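-- pv_equiv track=rewrite | github.com/FajFs/aoc | 2020/day6.py | part2
-- ===== SOURCE A (Python) =====
-- def part2(inp: list) -> int:
--     entries, e = [], []
--     for line in inp:
--         if not line:
--             entries.append(e)
--             e = list()
--         else:
--             e.append(set([c for c in line]))
--     entries.append(e)
--
--     res = []
--     for e in entries:
--         res.append(len((e[0].intersection(*e))))
--     return sum(res)
-- ===== SOURCE B (Python) =====
-- def _group_count(group):
--     chars = [c for l in group for c in dict.fromkeys(l)]
--     counts = {}
--     for c in chars:
--         counts[c] = counts.get(c, 0) + 1
--     return sum(1 for v in counts.values() if v == len(group))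
--
--
-- def part2(inp: list) -> int:
--     total = 0
--     group = []
--     for line in inp + ['']:
--         if line:
--             group.append(line)
--         else:
--             total += _group_count(group)
--             group = []
--     return total
-- ===== Notes on version B (the rewrite author's own statement) =====
-- stated objective: alternative
-- what changed: B replaces A's build-all-groups-of-sets-then-repeated-set-intersection with a single streaming pass that, per group, tallies in how many lines each character occurs and counts the characters whose tally equals the group size.
import Mathlib
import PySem

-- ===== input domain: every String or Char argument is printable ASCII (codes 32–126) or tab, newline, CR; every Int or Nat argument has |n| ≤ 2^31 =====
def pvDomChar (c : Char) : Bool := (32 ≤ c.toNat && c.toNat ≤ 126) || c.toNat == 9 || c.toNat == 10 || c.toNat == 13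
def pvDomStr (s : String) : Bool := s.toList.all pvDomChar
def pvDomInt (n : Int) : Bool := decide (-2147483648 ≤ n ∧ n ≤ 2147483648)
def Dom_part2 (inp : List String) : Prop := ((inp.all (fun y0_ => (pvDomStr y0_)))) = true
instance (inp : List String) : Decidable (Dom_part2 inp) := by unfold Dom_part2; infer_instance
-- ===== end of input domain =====

-- B groups the lines the same way but replaces the repeated set.intersection with a per-group
-- character-frequency tally thresholded at the group size (objective: alternative algorithm).

-- ===== PORT A =====
-- literal port of A: build the list of groups of per-line character sets, then sum
-- len(e[0].intersection(*e)) over the groups.  'e[0]' raises IndexError on an empty group: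
-- PySem.List.pyGet? is none there; the .getD default is unreachable under Pre_part2.
def part2 (inp : List String) : Int :=
  let st := inp.foldl
    (fun (p : List (List (PySem.Set Char)) × List (PySem.Set Char)) line =>
      if line = "" then (p.1 ++ [p.2], [])
      else (p.1, p.2 ++ [PySem.Set.ofList line.toList]))
    ([], [])
  let entries := st.1 ++ [st.2]
  let res := entries.map (fun e =>
    ((PySem.Set.len (e.foldl (fun acc s => PySem.Set.inter acc s)
        ((PySem.List.pyGet? e 0).getD PySem.Set.empty))) : Int))
  res.sum

-- ===== PORT B =====
-- port of Source B's helper _group_count: tally how many lines of the group contain each character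
-- (dict.fromkeys(l) = PySem.List.dedup), then count the tallies equal to the group size.
def groupCount (g : List String) : Int :=
  let chars := g.flatMap (fun l => PySem.List.dedup l.toList)
  let counts := chars.foldl (fun d c => d.modify c 0 (· + 1)) PySem.Dict.empty
  (counts.values.map (fun v => if v = (g.length : Int) then (1 : Int) else 0)).sum

def part2_alt (inp : List String) : Int :=
  ((inp ++ [""]).foldl
    (fun (p : Int × List String) line =>
      if line ≠ "" then (p.1, p.2 ++ [line])
      else (p.1 + groupCount p.2, []))
    (0, [])).1

-- ===== PRECONDITION & SPEC =====
-- Pre_ excludes exactly the inputs on which A raises IndexError (so returns nothing): those whose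
-- blank-line grouping (= List.splitOn "") contains an empty group, i.e. empty input or a
-- leading/trailing/consecutive blank line.  B returns the sum over the remaining groups there.
def Pre_part2 (inp : List String) : Prop := ∀ g ∈ inp.splitOn "", g ≠ []
instance (inp : List String) : Decidable (Pre_part2 inp) := by unfold Pre_part2; infer_instance
def pvWitness_part2 : List String := ["ab", "a", "", "b"]

def Spec_part2 (inp : List String) (out : Int) : Prop := out = part2_alt inp
instance (inp : List String) (out : Int) : Decidable (Spec_part2 inp out) := by unfold Spec_part2; infer_instance

-- ===== CLAIM (what is proved, stated in full; the proofs are below) =====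
def Claim_equal_part2 : Prop := ∀ (inp : List String), Dom_part2 inp → Pre_part2 inp → Spec_part2 inp (part2 inp)

-- ===== LEMMAS AND PROOFS =====

def pvSetOf (l : String) : PySem.Set Char := PySem.Set.ofList l.toList

-- the per-group value A computes
def pvFA (g : List String) : Int :=
  ((PySem.Set.len ((g.map pvSetOf).foldl (fun acc s => PySem.Set.inter acc s)
      ((PySem.List.pyGet? (g.map pvSetOf) 0).getD PySem.Set.empty))) : Int)

lemma splitOn_cons (l : String) (ls : List String) :
    (l :: ls).splitOn "" = if l = "" then [] :: ls.splitOn "" else (ls.splitOn "").modifyHead (l :: ·) := by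
  simp [List.splitOn, List.splitOnP_cons]

lemma modifyHead_nil_append (S : List (List String)) :
    S.modifyHead (fun t => ([] : List String) ++ t) = S := by
  cases S <;> simp

lemma modifyHead_id (S : List (List String)) : S.modifyHead (fun t => t) = S := by
  cases S <;> simp

lemma modifyHead_comp (g : List String) (l : String) (S : List (List String)) :
    (S.modifyHead (l :: ·)).modifyHead (fun t => g ++ t) = S.modifyHead (fun t => (g ++ [l]) ++ t) := by
  cases S <;> simp

lemma foldA (inp : List String) (ent : List (List (PySem.Set Char))) (g : List String) :
    (inp.foldl
      (fun (p : List (List (PySem.Set Char)) × List (PySem.Set Char)) line =>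
        if line = "" then (p.1 ++ [p.2], [])
        else (p.1, p.2 ++ [PySem.Set.ofList line.toList]))
      (ent, g.map pvSetOf)).1
    ++ [(inp.foldl
      (fun (p : List (List (PySem.Set Char)) × List (PySem.Set Char)) line =>
        if line = "" then (p.1 ++ [p.2], [])
        else (p.1, p.2 ++ [PySem.Set.ofList line.toList]))
      (ent, g.map pvSetOf)).2]
    = ent ++ ((inp.splitOn "").modifyHead (fun t => g ++ t)).map (List.map pvSetOf) := by
  induction inp generalizing ent g with
  | nil => simp [List.splitOn_nil]
  | cons l ls ih =>
    by_cases hl : l = ""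
    · subst hl
      have h := ih (ent ++ [g.map pvSetOf]) []
      simp only [List.map_nil, List.foldl_cons, reduceIte] at h ⊢
      rw [h, splitOn_cons]
      simp only [reduceIte, modifyHead_nil_append, List.map_cons, List.modifyHead_cons,
        List.append_nil, List.append_assoc, List.singleton_append]
    · have h := ih ent (g ++ [l])
      simp only [List.foldl_cons, if_neg hl] at h ⊢
      rw [show (g.map pvSetOf ++ [PySem.Set.ofList l.toList]) = (g ++ [l]).map pvSetOf by
            simp [pvSetOf]]
      rw [h, splitOn_cons, if_neg hl, modifyHead_comp]

lemma part2_eq_sum (inp : List String) :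
    part2 inp = ((inp.splitOn "").map pvFA).sum := by
  have h := foldA inp [] []
  simp only [List.map_nil, List.nil_append] at h
  unfold part2
  simp only [h, List.map_map, modifyHead_id]
  rfl

lemma foldB (inp : List String) (t : Int) (g : List String) :
    ((inp ++ [""]).foldl
      (fun (p : Int × List String) line =>
        if line ≠ "" then (p.1, p.2 ++ [line])
        else (p.1 + groupCount p.2, []))
      (t, g)).1
    = t + (((inp.splitOn "").modifyHead (fun u => g ++ u)).map groupCount).sum := by
  induction inp generalizing t g with
  | nil => simp [List.splitOn_nil]
  | cons l ls ih =>
    by_cases hl : l = ""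
    · subst hl
      simp only [List.cons_append, List.foldl_cons, ne_eq, not_true_eq_false, if_false]
      rw [ih (t + groupCount g) []]
      rw [splitOn_cons]
      simp only [reduceIte, modifyHead_nil_append, List.map_cons, List.sum_cons,
        List.modifyHead_cons, List.append_nil]
      ring
    · simp only [List.cons_append, List.foldl_cons, ne_eq, hl, not_false_eq_true, if_true]
      rw [ih t (g ++ [l]), splitOn_cons, if_neg hl, modifyHead_comp]

lemma part2_alt_eq_sum (inp : List String) :
    part2_alt inp = ((inp.splitOn "").map groupCount).sum := by
  unfold part2_alt
  rw [foldB inp 0 []]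
  simp [modifyHead_id]

lemma mem_foldl_inter (ss : List (PySem.Set Char)) (s : PySem.Set Char) (c : Char) :
    c ∈ ss.foldl (fun acc t => PySem.Set.inter acc t) s ↔ c ∈ s ∧ ∀ t ∈ ss, c ∈ t := by
  induction ss generalizing s with
  | nil => simp
  | cons u us ih =>
    simp only [List.foldl_cons, ih, PySem.Set.mem_inter, List.mem_cons]
    constructor
    · rintro ⟨⟨hs, hu⟩, hrest⟩
      refine ⟨hs, fun t ht => ?_⟩
      rcases ht with rfl | ht
      · exact hu
      · exact hrest t ht
    · rintro ⟨hs, hall⟩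
      exact ⟨⟨hs, hall u (Or.inl rfl)⟩, fun t ht => hall t (Or.inr ht)⟩

lemma nodup_foldl_inter (ss : List (PySem.Set Char)) (s : PySem.Set Char) (h : s.Nodup) :
    (ss.foldl (fun acc t => PySem.Set.inter acc t) s).Nodup := by
  induction ss generalizing s with
  | nil => exact h
  | cons u us ih => exact ih _ (PySem.Set.nodup_inter s u h)

lemma count_chars (g : List String) (k : Char) :
    (g.flatMap (fun l => PySem.List.dedup l.toList)).count k
      = g.countP (fun l => decide (k ∈ l.toList)) := by
  induction g with
  | nil => simp
  | cons l t ih =>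
    rw [List.flatMap_cons, List.count_append, List.countP_cons, ih]
    by_cases hk : k ∈ l.toList
    · rw [List.count_eq_one_of_mem (by simp) (by simp [hk])]
      simp [hk, Nat.add_comm]
    · rw [List.count_eq_zero.mpr (by simp [hk])]
      simp [hk]

lemma groupCount_eq_countP (g : List String) :
    groupCount g
      = ((PySem.Set.ofList (g.flatMap (fun l => PySem.List.dedup l.toList))).countP
          (fun k => decide (∀ l ∈ g, k ∈ l.toList)) : Int) := by
  simp only [groupCount]
  rw [← PySem.Dict.counter_eq_foldl]
  rw [show (PySem.Dict.counter (g.flatMap fun l => PySem.List.dedup l.toList)).values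
        = (PySem.Set.ofList (g.flatMap fun l => PySem.List.dedup l.toList)).map
            (fun k => ((g.flatMap fun l => PySem.List.dedup l.toList).count k : Int)) by
      simp [PySem.Dict.values, PySem.Dict.items_counter]]
  rw [List.map_map]
  have h1 : ∀ k : Char,
      (((g.flatMap fun l => PySem.List.dedup l.toList).count k : Int) = (g.length : Int))
        ↔ (∀ l ∈ g, k ∈ l.toList) := by
    intro k
    rw [Int.natCast_inj, count_chars]
    constructor
    · intro h l hl
      have := List.countP_eq_length.mp h l hl
      simpa using this
    · intro h
      exact List.countP_eq_length.mpr fun l hl => by simpa using h l hl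
  calc ((PySem.Set.ofList (g.flatMap fun l => PySem.List.dedup l.toList)).map
          ((fun v => if v = (g.length : Int) then (1:Int) else 0) ∘
            fun k => ((g.flatMap fun l => PySem.List.dedup l.toList).count k : Int))).sum
      = ((PySem.Set.ofList (g.flatMap fun l => PySem.List.dedup l.toList)).map
          (fun k => if (∀ l ∈ g, k ∈ l.toList) then (1:Int) else 0)).sum := by
        apply congrArg
        apply List.map_congr_left
        intro k _
        simp only [Function.comp]
        by_cases hk : ∀ l ∈ g, k ∈ l.toList
        · rw [if_pos ((h1 k).mpr hk), if_pos hk]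
        · rw [if_neg (fun hc => hk ((h1 k).mp hc)), if_neg hk]
    _ = ((PySem.Set.ofList (g.flatMap fun l => PySem.List.dedup l.toList)).countP
          (fun k => decide (∀ l ∈ g, k ∈ l.toList)) : Int) := by
        rw [← PySem.List.sum_map_ite_one_zero (fun k => decide (∀ l ∈ g, k ∈ l.toList))]
        apply congrArg
        apply List.map_congr_left
        intro k _
        by_cases hk : ∀ l ∈ g, k ∈ l.toList <;> simp [hk]

lemma group_eq (g : List String) (hg : g ≠ []) : pvFA g = groupCount g := by
  obtain ⟨l0, rest, rfl⟩ := List.exists_cons_of_ne_nil hg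
  rw [groupCount_eq_countP]
  unfold pvFA
  set ss := (l0 :: rest).map pvSetOf with hss
  have hget : (PySem.List.pyGet? ss 0).getD PySem.Set.empty = pvSetOf l0 := by
    simp [hss, PySem.List.pyGet?, PySem.List.pyIdx?]
  rw [hget]
  set I := ss.foldl (fun acc s => PySem.Set.inter acc s) (pvSetOf l0) with hI
  have hmemI : ∀ c, c ∈ I ↔ ∀ l ∈ l0 :: rest, c ∈ l.toList := by
    intro c
    rw [hI, mem_foldl_inter]
    constructor
    · rintro ⟨-, hall⟩ l hl
      have := hall (pvSetOf l) (by rw [hss]; exact List.mem_map.mpr ⟨l, hl, rfl⟩)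
      simpa [pvSetOf, PySem.Set.mem_ofList] using this
    · intro h
      refine ⟨by simpa [pvSetOf, PySem.Set.mem_ofList] using h l0 (by simp), ?_⟩
      intro t ht
      simp only [hss, List.mem_map] at ht
      obtain ⟨l, hl, rfl⟩ := ht
      simpa [pvSetOf, PySem.Set.mem_ofList] using h l hl
  have hnodupI : I.Nodup := nodup_foldl_inter ss (pvSetOf l0) (PySem.Set.nodup_ofList _)
  set chars := (l0 :: rest).flatMap (fun l => PySem.List.dedup l.toList) with hchars
  set F := (PySem.Set.ofList chars).filter (fun k => decide (∀ l ∈ l0 :: rest, k ∈ l.toList)) with hF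
  have hcount : (PySem.Set.ofList chars).countP (fun k => decide (∀ l ∈ l0 :: rest, k ∈ l.toList))
      = F.length := List.countP_eq_length_filter ..
  have hnodupF : F.Nodup := (PySem.Set.nodup_ofList _).filter _
  have hmemF : ∀ c, c ∈ F ↔ ∀ l ∈ l0 :: rest, c ∈ l.toList := by
    intro c
    rw [hF, List.mem_filter]
    constructor
    · rintro ⟨-, h⟩; simpa using h
    · intro h
      refine ⟨?_, by simpa using h⟩
      rw [PySem.Set.mem_ofList, hchars, List.mem_flatMap]
      exact ⟨l0, by simp, by simp [h l0 (by simp)]⟩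
  have hfin : I.toFinset = F.toFinset := by
    ext c
    simp only [List.mem_toFinset, hmemI, hmemF]
  have : I.length = F.length := by
    rw [← List.toFinset_card_of_nodup hnodupI, ← List.toFinset_card_of_nodup hnodupF, hfin]
  rw [hcount, ← this]
  rfl

-- ===== VERDICT (by name: the statement is the Claim_ definition above) =====
theorem part2_spec : Claim_equal_part2 := by
  intro inp _dom hpre
  unfold Spec_part2
  rw [part2_eq_sum, part2_alt_eq_sum]
  exact congrArg List.sum (List.map_congr_left fun g hg => group_eq g (hpre g hg))
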